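-- pv_equiv track=rewrite | github.com/cloudwarriors-ai/hackyeaster-solver | src/hackyeaster_mcp/ctfutils.py | _transform_vigenere
-- ===== SOURCE A (Python) =====
-- def _transform_vigenere(data: str, key: str = "key", decrypt: bool = True, **_) -> str:
--     if not key:
--         return "Vigenere requires a 'key' parameter"
--     result = []
--     key_idx = 0
--     for ch in data:
--         if ch.isalpha():
--             base = ord("A") if ch.isupper() else ord("a")
--             k = ord(key[key_idx % len(key)].lower()) - ord("a")
--             shift = -k if decrypt else k
--             result.append(chr((ord(ch) - base + shift) % 26 + base))
--             key_idx += 1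
--         else:
--             result.append(ch)
--     return "".join(result)
-- ===== SOURCE B (Python) =====
-- def _transform_vigenere(data: str, key: str = "key", decrypt: bool = True, **_) -> str:
--     if not key:
--         return "Vigenere requires a 'key' parameter"
--     letters = [ch for ch in data if ch.isalpha()]
--     ciphered = [_cipher_letter(ch, key[i % len(key)], decrypt) for i, ch in enumerate(letters)]
--     it = iter(ciphered)
--     return "".join(next(it) if ch.isalpha() else ch for ch in data)
--
--
-- def _cipher_letter(ch: str, kch: str, decrypt: bool) -> str:
--     base = ord("A") if ch.isupper() else ord("a")
--     k = ord(kch.lower()) - ord("a")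
--     shift = -k if decrypt else k
--     return chr((ord(ch) - base + shift) % 26 + base)
-- ===== Notes on version B (the rewrite author's own statement) =====
-- stated objective: alternative
-- what changed: B replaces A's single stateful loop carrying a key index with a filter/transform/merge pipeline: it extracts the letter stream, enciphers it by enumeration (index i mod key length), and merges the ciphered letters back into the non-letter skeleton via an iterator.
import Mathlib
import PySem

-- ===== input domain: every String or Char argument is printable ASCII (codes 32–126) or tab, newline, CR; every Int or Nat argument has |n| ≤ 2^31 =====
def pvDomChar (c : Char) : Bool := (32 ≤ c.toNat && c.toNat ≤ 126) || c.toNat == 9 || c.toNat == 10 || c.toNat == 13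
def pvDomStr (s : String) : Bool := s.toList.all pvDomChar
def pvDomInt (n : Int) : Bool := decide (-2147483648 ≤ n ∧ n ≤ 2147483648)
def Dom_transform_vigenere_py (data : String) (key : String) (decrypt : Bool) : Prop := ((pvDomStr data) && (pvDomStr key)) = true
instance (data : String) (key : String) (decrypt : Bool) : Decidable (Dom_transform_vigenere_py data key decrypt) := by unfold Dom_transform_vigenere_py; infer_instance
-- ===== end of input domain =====

-- B re-implements the Vigenere transform as a filter/encipher/merge pipeline instead of A's
-- single stateful loop; same cost, alternative structure; return-value equivalence only.


-- ===== PORT A =====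
def transform_vigenere_py (data : String) (key : String) (decrypt : Bool) : String :=
  if key.toList = [] then "Vigenere requires a 'key' parameter"
  else
    let kl := key.toList
    let step := fun (st : List Char × Nat) (ch : Char) =>
      if PySem.Chars.isalpha ch then
        let base : Int := if PySem.Chars.isupper ch then 65 else 97
        let k : Int := ((PySem.Chars.lowerChar (kl.getD (st.2 % kl.length) 'a')).toNat : Int) - 97
        let shift : Int := if decrypt then -k else k
        (st.1 ++ [Char.ofNat (PySem.Int.mod (((ch.toNat : Int) - base) + shift) 26 + base).toNat], st.2 + 1)
      else
        (st.1 ++ [ch], st.2)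
    String.mk (data.toList.foldl step ([], 0)).1


-- ===== PORT B =====
-- helper: Python `_cipher_letter`
def pvCipherLetter (ch : Char) (kch : Char) (decrypt : Bool) : Char :=
  let base : Int := if PySem.Chars.isupper ch then 65 else 97
  let k : Int := ((PySem.Chars.lowerChar kch).toNat : Int) - 97
  let shift : Int := if decrypt then -k else k
  Char.ofNat (PySem.Int.mod (((ch.toNat : Int) - base) + shift) 26 + base).toNat

-- `[_cipher_letter(ch, key[i % len(key)], decrypt) for i, ch in enumerate(letters)]`,
-- with the enumeration index carried explicitly
def pvEncFrom (kl : List Char) (decrypt : Bool) (i : Nat) : List Char → List Char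
  | [] => []
  | ch :: rest =>
      pvCipherLetter ch (kl.getD (i % kl.length) 'a') decrypt :: pvEncFrom kl decrypt (i + 1) rest

-- the final join: take the next ciphered letter for each alphabetic char, keep others
def pvMerge : List Char → List Char → List Char
  | [], _ => []
  | ch :: rest, enc =>
      if PySem.Chars.isalpha ch then
        match enc with
        | e :: es => e :: pvMerge rest es
        | [] => ch :: pvMerge rest []   -- iterator exhausted (never happens: enc has one letter per alpha char)
      else
        ch :: pvMerge rest enc

def transform_vigenere_py_alt (data : String) (key : String) (decrypt : Bool) : String :=
  if key.toList = [] then "Vigenere requires a 'key' parameter"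
  else
    let letters := data.toList.filter PySem.Chars.isalpha
    let ciphered := pvEncFrom key.toList decrypt 0 letters
    String.mk (pvMerge data.toList ciphered)


-- ===== PRECONDITION & SPEC =====
def Spec_transform_vigenere_py (data : String) (key : String) (decrypt : Bool) (out : String) : Prop := out = transform_vigenere_py_alt data key decrypt
instance (data : String) (key : String) (decrypt : Bool) (out : String) : Decidable (Spec_transform_vigenere_py data key decrypt out) := by unfold Spec_transform_vigenere_py; infer_instance

-- ===== CLAIM (what is proved, stated in full; the proofs are below) =====
def Claim_equal_transform_vigenere_py : Prop := ∀ (data : String) (key : String) (decrypt : Bool), Dom_transform_vigenere_py data key decrypt → Spec_transform_vigenere_py data key decrypt (transform_vigenere_py data key decrypt)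

-- ===== LEMMAS AND PROOFS =====

-- the main loop invariant: A's fold from accumulator (acc, i) appends exactly the merge of
-- the remaining chars with the letter stream enciphered from index i
theorem pv_loop_eq (kl : List Char) (decrypt : Bool) :
    ∀ (cs : List Char) (acc : List Char) (i : Nat),
      (cs.foldl (fun (st : List Char × Nat) (ch : Char) =>
        if PySem.Chars.isalpha ch then
          let base : Int := if PySem.Chars.isupper ch then 65 else 97
          let k : Int := ((PySem.Chars.lowerChar (kl.getD (st.2 % kl.length) 'a')).toNat : Int) - 97
          let shift : Int := if decrypt then -k else k
          (st.1 ++ [Char.ofNat (PySem.Int.mod (((ch.toNat : Int) - base) + shift) 26 + base).toNat], st.2 + 1)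
        else
          (st.1 ++ [ch], st.2)) (acc, i)).1
      = acc ++ pvMerge cs (pvEncFrom kl decrypt i (cs.filter PySem.Chars.isalpha)) := by
  intro cs
  induction cs with
  | nil => intro acc i; simp [pvMerge]
  | cons ch rest ih =>
      intro acc i
      by_cases h : PySem.Chars.isalpha ch = true
      · simp only [List.foldl_cons, List.filter_cons, h]
        rw [ih]
        simp [pvEncFrom, pvMerge, pvCipherLetter, h]
      · simp only [List.foldl_cons, List.filter_cons, h]
        rw [ih]
        simp [pvMerge, h]


-- ===== VERDICT (by name: the statement is the Claim_ definition above) =====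
theorem transform_vigenere_py_spec : Claim_equal_transform_vigenere_py := by
  intro data key decrypt _
  unfold Spec_transform_vigenere_py transform_vigenere_py transform_vigenere_py_alt
  by_cases hk : key.toList = []
  · simp [hk]
  · simp only [if_neg hk]
    rw [pv_loop_eq key.toList decrypt data.toList [] 0]
    simp
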